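-- pv_equiv track=rewrite | github.com/Glesebochu/Intelligent-Traffic-Agent | adaptive_agent.py | group_lanes_by_direction
-- ===== SOURCE A (Python) =====
-- def group_lanes_by_direction(controlled_lanes):
--     lane_groups = {}
--
--     for lane in controlled_lanes:
--         # Group lanes by their directions and index
--         # For example: 'lane_1_n', 'lane_2_n' -> 'n'
--         direction = lane.split("_")[-1]
--         if direction not in lane_groups:
--             lane_groups[direction] = []
--         lane_groups[direction].append(lane)
--
--     return list(lane_groups.values())
-- ===== SOURCE B (Python) =====
-- def group_lanes_by_direction(controlled_lanes):
--     # build the ordered distinct suffixes first, then one scan per suffix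
--     directions = list(dict.fromkeys(lane.split("_")[-1] for lane in controlled_lanes))
--     return [[lane for lane in controlled_lanes if lane.split("_")[-1] == d]
--             for d in directions]
-- ===== Notes on version B (the rewrite author's own statement) =====
-- stated objective: alternative
-- what changed: Replaces the single accumulate-into-dict-of-lists pass by first computing the ordered distinct direction suffixes (dict.fromkeys) and then rescanning the input once per direction to collect its group.
import Mathlib
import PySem

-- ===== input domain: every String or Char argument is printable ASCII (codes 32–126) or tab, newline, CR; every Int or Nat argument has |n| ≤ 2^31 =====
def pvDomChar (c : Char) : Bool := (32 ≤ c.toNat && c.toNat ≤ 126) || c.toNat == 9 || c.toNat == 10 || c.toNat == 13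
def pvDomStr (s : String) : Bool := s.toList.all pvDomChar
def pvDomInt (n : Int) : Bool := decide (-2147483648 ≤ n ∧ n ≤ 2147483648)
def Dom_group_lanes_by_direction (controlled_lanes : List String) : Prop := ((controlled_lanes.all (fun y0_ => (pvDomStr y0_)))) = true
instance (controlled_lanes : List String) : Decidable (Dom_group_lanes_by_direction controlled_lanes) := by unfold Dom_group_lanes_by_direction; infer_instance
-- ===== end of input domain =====

-- B groups by first computing the ordered distinct suffixes and then rescanning the list once
-- per suffix, instead of A's single accumulate-into-dict pass (alternative decomposition, not faster).

-- ===== PORT A =====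
-- lane.split("_")[-1]; split on a nonempty separator is never empty, so the [-1] lookup
-- cannot raise and the "" default of pyGetD is never taken.
def laneDirection (lane : String) : String :=
  -- split? is none only for sep = "" and the split list is never empty, so neither default is taken
  PySem.List.pyGetD ((PySem.Str.split? lane "_").getD []) (-1) ""

def group_lanes_by_direction (controlled_lanes : List String) : List (List String) :=
  -- for lane in controlled_lanes: if direction not in d: d[direction] = []; d[direction].append(lane)
  (controlled_lanes.foldl
    (fun d lane =>
      let direction := laneDirection lane
      let d := if d.contains direction then d else d.insert direction []
      d.modify direction [] (fun g => g ++ [lane]))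
    PySem.Dict.empty).values

-- ===== PORT B =====
def group_lanes_by_direction_alt (controlled_lanes : List String) : List (List String) :=
  let directions := PySem.List.dedup (controlled_lanes.map laneDirection)
  directions.map (fun d => controlled_lanes.filter (fun lane => laneDirection lane == d))

-- ===== PRECONDITION & SPEC =====
def Spec_group_lanes_by_direction (controlled_lanes : List String) (out : List (List String)) : Prop := out = group_lanes_by_direction_alt controlled_lanes
instance (controlled_lanes : List String) (out : List (List String)) : Decidable (Spec_group_lanes_by_direction controlled_lanes out) := by unfold Spec_group_lanes_by_direction; infer_instance

-- ===== CLAIM (what is proved, stated in full; the proofs are below) =====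
def Claim_equal_group_lanes_by_direction : Prop := ∀ (controlled_lanes : List String), Dom_group_lanes_by_direction controlled_lanes → Spec_group_lanes_by_direction controlled_lanes (group_lanes_by_direction controlled_lanes)

-- ===== LEMMAS AND PROOFS =====

-- A's "ensure key, then append" body is the library 'modify' in one step.
theorem insert_empty_then_modify (d : PySem.Dict String (List String)) (k : String)
    (f : List String → List String) :
    (if d.contains k then d else d.insert k []).modify k [] f = d.modify k [] f := by
  by_cases h : d.contains k = true
  · simp [h]
  · simp only [Bool.not_eq_true] at h
    simp only [h, Bool.false_eq_true, if_false]
    simp [PySem.Dict.modify, PySem.Dict.insert_insert_self,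
      PySem.Dict.getD_of_not_contains _ _ h]

theorem loop_eq_modify_fold (controlled_lanes : List String) :
    (controlled_lanes.foldl
      (fun d lane =>
        let direction := laneDirection lane
        let d := if d.contains direction then d else d.insert direction []
        d.modify direction [] (fun g => g ++ [lane]))
      PySem.Dict.empty)
    = (controlled_lanes.map (fun l => (laneDirection l, l))).foldl
        (fun d p => d.modify p.1 [] (fun g => g ++ [p.2])) PySem.Dict.empty := by
  rw [List.foldl_map]
  exact PySem.List.foldl_congr_mem _ _ _ _
    (fun d lane _ => insert_empty_then_modify d _ _)

-- ===== VERDICT (by name: the statement is the Claim_ definition above) =====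
theorem group_lanes_by_direction_spec : Claim_equal_group_lanes_by_direction := by
  intro xs _
  unfold Spec_group_lanes_by_direction group_lanes_by_direction group_lanes_by_direction_alt
  rw [loop_eq_modify_fold]
  set pairs := xs.map (fun l => (laneDirection l, l)) with hpairs
  have hnd : ((pairs.foldl (fun d p => d.modify p.1 [] (fun g => g ++ [p.2]))
      PySem.Dict.empty).keys).Nodup := by
    have := PySem.Dict.nodup_keys_foldl_modify_key pairs Prod.fst []
      (fun _ p g => g ++ [p.2]) PySem.Dict.empty (by simp [PySem.Dict.keys_empty])
    simpa using this
  rw [PySem.Dict.values_eq_map_keys _ hnd []]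
  have hkeys : (pairs.foldl (fun d p => d.modify p.1 [] (fun g => g ++ [p.2]))
      PySem.Dict.empty).keys = PySem.List.dedup (xs.map laneDirection) := by
    have := PySem.Dict.keys_foldl_modify_key pairs Prod.fst []
      (fun _ p g => g ++ [p.2]) PySem.Dict.empty
    simp only [PySem.Dict.keys_empty] at this
    rw [this, PySem.Set.update_nil_left, PySem.List.dedup_eq_ofList, hpairs,
      List.map_map]
    rfl
  rw [hkeys]
  apply List.map_congr_left
  intro k _
  rw [PySem.Dict.getD_foldl_modify_append]
  simp [hpairs, List.filter_map, Function.comp_def]
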